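-- pv_equiv track=rewrite | github.com/nkinney06/fSTRs | figure_R2.py | generate_motifs_by_complementarity
-- ===== SOURCE A (Python) =====
-- from itertools import product
--
-- def is_self_reverse_complement(motif):
--     """Check if an motif is its own reverse complement."""
--     complement = {'A': 'T', 'T': 'A', 'G': 'C', 'C': 'G'}
--     rev_comp = "".join(complement[base] for base in reversed(motif))
--     return motif == rev_comp
--
-- def generate_motifs_by_complementarity(max_length):
--     """Generate all RNA motifs and separate them into self-reverse-complementary and non-complementary."""
--     bases = ['A', 'T', 'G', 'C']
--     self_complementary = set()
--     non_complementary = set()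
--     for length in range(1, max_length + 1):
--         for motif in product(bases, repeat=length):
--             motif_str = "".join(motif)
--             if is_self_reverse_complement(motif_str):
--                 self_complementary.add(motif_str)
--             else:
--                 non_complementary.add(motif_str)
--     return sorted(self_complementary), sorted(non_complementary)
-- ===== SOURCE B (Python) =====
-- def generate_motifs_by_complementarity(max_length):
--     """Generate all RNA motifs and separate them into self-reverse-complementary and non-complementary."""
--     bases = "ATGC"
--     comp = {'A': 'T', 'T': 'A', 'G': 'C', 'C': 'G'}
--     # Only even-length motifs can be self-reverse-complementary (no base is its own
--     # complement); build them directly as half + reverse-complement(half).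
--     self_complementary = []
--     halves = ['']
--     for half in range(1, max_length // 2 + 1):
--         halves = [h + b for h in halves for b in bases]
--         for h in halves:
--             self_complementary.append(h + ''.join(comp[c] for c in reversed(h)))
--     self_set = set(self_complementary)
--     non_complementary = []
--     motifs = ['']
--     for length in range(1, max_length + 1):
--         motifs = [m + b for m in motifs for b in bases]
--         for m in motifs:
--             if m not in self_set:
--                 non_complementary.append(m)
--     return sorted(self_complementary), sorted(non_complementary)
-- ===== Notes on version B (the rewrite author's own statement) =====
-- stated objective: alternative
-- what changed: Instead of testing every motif with a per-motif reverse-complement construction, B builds the self-complementary set directly as half+revcomp(half) over all halves (only even lengths can be self-reverse-complementary) and classifies the remaining motifs by a set membership test, growing motif lists incrementally instead of itertools.product.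
import Mathlib
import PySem

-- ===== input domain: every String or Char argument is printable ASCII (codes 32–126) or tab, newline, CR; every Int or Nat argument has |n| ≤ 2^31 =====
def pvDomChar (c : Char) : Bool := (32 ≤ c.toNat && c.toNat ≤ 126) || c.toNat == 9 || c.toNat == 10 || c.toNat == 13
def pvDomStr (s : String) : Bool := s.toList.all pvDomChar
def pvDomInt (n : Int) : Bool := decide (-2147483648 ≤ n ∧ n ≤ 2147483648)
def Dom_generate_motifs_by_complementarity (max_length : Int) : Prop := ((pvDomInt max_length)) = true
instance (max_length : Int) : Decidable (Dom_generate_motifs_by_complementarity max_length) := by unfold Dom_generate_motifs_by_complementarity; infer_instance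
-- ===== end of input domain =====

-- B builds the self-reverse-complementary motifs directly as half + revcomp(half) and classifies
-- the rest by set membership, instead of testing every motif with a fresh reverse-complement.

-- ===== PORT A =====

-- complement dict lookup; exact on 'A','T','G','C' — the only characters either program
-- ever looks up (Python would raise KeyError elsewhere, which is unreachable here)
def pvComplement (c : Char) : Char :=
  if c = 'A' then 'T' else if c = 'T' then 'A' else if c = 'G' then 'C'
  else if c = 'C' then 'G' else c

def is_self_reverse_complement (motif : String) : Bool :=
  let rev_comp := String.ofList (motif.toList.reverse.map pvComplement)
  motif == rev_comp

def pvBases : List Char := ['A', 'T', 'G', 'C']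

-- itertools.product(bases, repeat=n): first coordinate varies slowest
def pvProduct : Nat → List (List Char)
  | 0 => [[]]
  | n + 1 => pvBases.flatMap (fun b => (pvProduct n).map (fun t => b :: t))

def generate_motifs_by_complementarity (max_length : Int) : List String × List String :=
  let p := (PySem.List.pyRange 1 (max_length + 1) 1).foldl
    (fun (p : PySem.Set String × PySem.Set String) length =>
      (pvProduct length.toNat).foldl
        (fun (q : PySem.Set String × PySem.Set String) motif =>
          let motif_str := String.ofList motif
          if is_self_reverse_complement motif_str then (PySem.Set.add q.1 motif_str, q.2)
          else (q.1, PySem.Set.add q.2 motif_str)) p)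
    (PySem.Set.empty, PySem.Set.empty)
  (PySem.List.sorted p.1 (fun x => x) false, PySem.List.sorted p.2 (fun x => x) false)

-- ===== PORT B =====

-- [m + b for m in ms for b in bases]
def pvExtend (ms : List (List Char)) : List (List Char) :=
  ms.flatMap (fun m => pvBases.map (fun b => m ++ [b]))

-- ''.join(comp[c] for c in reversed(h))
def pvRevComp (h : List Char) : List Char := h.reverse.map pvComplement

def generate_motifs_by_complementarity_alt (max_length : Int) : List String × List String :=
  let sc := (PySem.List.pyRange 1 (PySem.Int.floordiv max_length 2 + 1) 1).foldl
    (fun (st : List (List Char) × List String) _ =>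
      let halves := pvExtend st.1
      (halves, st.2 ++ halves.map (fun h => String.ofList (h ++ pvRevComp h))))
    ([[]], [])
  let self_complementary := sc.2
  let self_set : PySem.Set String := PySem.Set.ofList self_complementary
  let nc := (PySem.List.pyRange 1 (max_length + 1) 1).foldl
    (fun (st : List (List Char) × List String) _ =>
      let motifs := pvExtend st.1
      (motifs, st.2 ++ (motifs.filter
        (fun m => !(PySem.Set.contains self_set (String.ofList m)))).map String.ofList))
    ([[]], [])
  (PySem.List.sorted self_complementary (fun x => x) false,
   PySem.List.sorted nc.2 (fun x => x) false)

-- ===== PRECONDITION & SPEC =====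
def Spec_generate_motifs_by_complementarity (max_length : Int) (out : List String × List String) : Prop := out = generate_motifs_by_complementarity_alt max_length
instance (max_length : Int) (out : List String × List String) : Decidable (Spec_generate_motifs_by_complementarity max_length out) := by unfold Spec_generate_motifs_by_complementarity; infer_instance

-- ===== CLAIM (what is proved, stated in full; the proofs are below) =====
def Claim_equal_generate_motifs_by_complementarity : Prop := ∀ (max_length : Int), Dom_generate_motifs_by_complementarity max_length → Spec_generate_motifs_by_complementarity max_length (generate_motifs_by_complementarity max_length)

-- ===== LEMMAS AND PROOFS =====

def pvCharsOK (m : List Char) : Prop := ∀ c ∈ m, c ∈ pvBases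

def pvGrowB : Nat → List (List Char)
  | 0 => [[]]
  | n + 1 => pvExtend (pvGrowB n)

theorem pvCompl_mem (c : Char) (h : c ∈ pvBases) : pvComplement c ∈ pvBases := by
  simp [pvBases] at h ⊢; rcases h with rfl|rfl|rfl|rfl <;> simp [pvComplement]
theorem pvCompl_invol (c : Char) (h : c ∈ pvBases) : pvComplement (pvComplement c) = c := by
  simp [pvBases] at h; rcases h with rfl|rfl|rfl|rfl <;> simp [pvComplement]
theorem pvCompl_ne (c : Char) (h : c ∈ pvBases) : pvComplement c ≠ c := by
  simp [pvBases] at h; rcases h with rfl|rfl|rfl|rfl <;> simp [pvComplement]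
theorem pvRevComp_charsOK {l : List Char} (h : pvCharsOK l) : pvCharsOK (pvRevComp l) := by
  intro c hc
  simp [pvRevComp] at hc
  obtain ⟨a, ha, rfl⟩ := hc
  exact pvCompl_mem a (h a ha)
theorem pvRevComp_invol {l : List Char} (h : pvCharsOK l) : pvRevComp (pvRevComp l) = l := by
  simp [pvRevComp, List.map_map]
  conv_rhs => rw [← List.map_id l]
  exact List.map_congr_left fun c hc => pvCompl_invol c (h c hc)
theorem mem_pvProduct (n : Nat) (m : List Char) :
    m ∈ pvProduct n ↔ m.length = n ∧ pvCharsOK m := by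
  induction n generalizing m with
  | zero => simp [pvProduct, pvCharsOK]; rintro rfl; simp
  | succ k ih =>
    simp only [pvProduct, List.mem_flatMap, List.mem_map]
    constructor
    · rintro ⟨b, hb, t, ht, rfl⟩
      obtain ⟨hlen, hch⟩ := (ih t).1 ht
      refine ⟨by simp [hlen], ?_⟩
      intro c hc; rcases hc with _|⟨_,hc⟩
      · exact hb
      · exact hch c (by assumption)
    · rintro ⟨hlen, hch⟩
      cases m with
      | nil => simp at hlen
      | cons b t =>
        exact ⟨b, hch b (by simp), t, (ih t).2 ⟨by simpa using hlen,
          fun c hc => hch c (by simp [hc])⟩, rfl⟩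
theorem mem_pvGrowB (n : Nat) (m : List Char) :
    m ∈ pvGrowB n ↔ m.length = n ∧ pvCharsOK m := by
  induction n generalizing m with
  | zero => simp [pvGrowB, pvCharsOK]; rintro rfl; simp
  | succ k ih =>
    simp only [pvGrowB, pvExtend, List.mem_flatMap, List.mem_map]
    constructor
    · rintro ⟨t, ht, b, hb, rfl⟩
      obtain ⟨hlen, hch⟩ := (ih t).1 ht
      refine ⟨by simp [hlen], ?_⟩
      intro c hc
      rcases List.mem_append.1 hc with hc | hc
      · exact hch c hc
      · have : c = b := by simpa using hc
        exact this ▸ hb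
    · rintro ⟨hlen, hch⟩
      cases m.eq_nil_or_concat with
      | inl h => subst h; simp at hlen
      | inr h =>
        obtain ⟨t, b, rfl⟩ := h
        refine ⟨t, (ih t).2 ⟨by simp at hlen; omega,
          fun c hc => hch c (by simp [hc])⟩, b, hch b (by simp), by simp⟩
theorem nodup_pvProduct (n : Nat) : (pvProduct n).Nodup := by
  induction n with
  | zero => simp [pvProduct]
  | succ k ih =>
    rw [pvProduct, List.nodup_flatMap]
    refine ⟨fun b _ => ih.map (fun x y h => by simpa using h), ?_⟩
    have : ∀ b b' : Char, b ≠ b' →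
        List.Disjoint ((pvProduct k).map (fun t => b :: t)) ((pvProduct k).map (fun t => b' :: t)) := by
      intro b b' hne x hx hy
      simp only [List.mem_map] at hx hy
      obtain ⟨t, _, rfl⟩ := hx
      obtain ⟨t', _, h⟩ := hy
      have : b = b' := by
        have := congrArg (fun l => l.head?) h
        simpa using this.symm
      exact hne this
    have hnd : pvBases.Pairwise (· ≠ ·) := by decide
    exact hnd.imp_of_mem (fun _ _ hne => this _ _ hne)
theorem nodup_pvGrowB (n : Nat) : (pvGrowB n).Nodup := by
  induction n with
  | zero => simp [pvGrowB]
  | succ k ih =>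
    rw [pvGrowB, pvExtend, List.nodup_flatMap]
    constructor
    · intro m _
      refine List.Nodup.map ?_ (by decide)
      intro x y h
      simpa using h
    · refine ih.imp ?_
      intro a b hne x hx hy
      simp only [List.mem_map] at hx hy
      obtain ⟨c, _, rfl⟩ := hx
      obtain ⟨c', _, h⟩ := hy
      exact hne (by simpa using congrArg List.dropLast h.symm)

theorem cond_ofList (m : List Char) :
    is_self_reverse_complement (String.ofList m) = decide (m = pvRevComp m) := by
  unfold is_self_reverse_complement
  have h1 : (String.ofList m).toList = m := by simp
  rw [h1]
  show decide (String.ofList m = String.ofList (m.reverse.map pvComplement)) = _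
  rw [decide_eq_decide, pvRevComp]
  constructor
  · intro hx
    simpa using congrArg String.toList hx
  · intro hx
    exact congrArg String.ofList hx

theorem pal_of_selfRC : ∀ (n : Nat) (m : List Char), m.length = n → pvCharsOK m →
    m = pvRevComp m → ∃ h', m = h' ++ pvRevComp h' := by
  intro n
  induction n using Nat.strong_induction_on with
  | _ n ih =>
    intro m hlen hc hself
    match m, hlen with
    | [], _ => exact ⟨[], by simp [pvRevComp]⟩
    | [c], _ =>
      exfalso
      have : c = pvComplement c := by simpa [pvRevComp] using hself
      exact pvCompl_ne c (hc c (by simp)) this.symm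
    | c :: t, hlen =>
      have ht : t ≠ [] := by
        intro h; subst h
        have : c = pvComplement c := by simpa [pvRevComp] using hself
        exact pvCompl_ne c (hc c (by simp)) this.symm
      obtain ⟨t', d, rfl⟩ : ∃ t' d, t = t' ++ [d] := by
        rcases t.eq_nil_or_concat with h | ⟨t', d, h⟩
        · exact absurd h ht
        · exact ⟨t', d, by simpa using h⟩
      -- m = c :: t' ++ [d];  rc m = pvComplement d :: (rc t' ++ [pvComplement c])
      have hrc : pvRevComp (c :: (t' ++ [d]))
          = pvComplement d :: (pvRevComp t' ++ [pvComplement c]) := by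
        simp [pvRevComp]
      rw [hrc] at hself
      have hcd : c = pvComplement d := by
        have := congrArg (fun l => l.head?) hself
        simpa using this
      have htail : t' ++ [d] = pvRevComp t' ++ [pvComplement c] := by
        have := congrArg List.tail hself
        simpa using this
      have hlen' : t'.length = (pvRevComp t').length := by
        simp [pvRevComp]
      obtain ⟨h1, h2⟩ := List.append_inj htail hlen'
      have hct' : pvCharsOK t' := fun x hx => hc x (by simp [hx])
      obtain ⟨h', rfl⟩ := ih t'.length (by simp at hlen ⊢; omega) t' rfl hct' h1
      refine ⟨c :: h', ?_⟩
      have : pvRevComp (c :: h') = pvRevComp h' ++ [pvComplement c] := by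
        simp [pvRevComp]
      rw [this]
      have hd : d = pvComplement c := by simpa using h2
      subst hd
      simp

def pvAllA (n : Nat) : List String :=
  (List.range n).flatMap (fun i => (pvProduct (i + 1)).map String.ofList)
def pvSelfB (n : Nat) : List String :=
  (List.range (n / 2)).flatMap
    (fun i => (pvGrowB (i + 1)).map (fun h => String.ofList (h ++ pvRevComp h)))
def pvNonB (n : Nat) : List String :=
  (List.range n).flatMap (fun i =>
    ((pvGrowB (i + 1)).filter
      (fun m => !(PySem.Set.contains (pvSelfB n) (String.ofList m)))).map String.ofList)

theorem ofList_inj {a b : List Char} (h : String.ofList a = String.ofList b) : a = b := by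
  simpa using congrArg String.toList h

theorem mem_pvAllA (n : Nat) (s : String) :
    s ∈ pvAllA n ↔ ∃ m, s = String.ofList m ∧ 1 ≤ m.length ∧ m.length ≤ n ∧ pvCharsOK m := by
  simp only [pvAllA, List.mem_flatMap, List.mem_range, List.mem_map]
  constructor
  · rintro ⟨i, hi, m, hm, rfl⟩
    obtain ⟨hlen, hch⟩ := (mem_pvProduct _ _).1 hm
    exact ⟨m, rfl, by omega, by omega, hch⟩
  · rintro ⟨m, rfl, h1, h2, hch⟩
    exact ⟨m.length - 1, by omega, m, (mem_pvProduct _ _).2 ⟨by omega, hch⟩, rfl⟩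

theorem mem_pvSelfB (n : Nat) (s : String) :
    s ∈ pvSelfB n ↔
      ∃ h, s = String.ofList (h ++ pvRevComp h) ∧ 1 ≤ h.length ∧ h.length ≤ n / 2 ∧ pvCharsOK h := by
  simp only [pvSelfB, List.mem_flatMap, List.mem_range, List.mem_map]
  constructor
  · rintro ⟨i, hi, h, hh, rfl⟩
    obtain ⟨hlen, hch⟩ := (mem_pvGrowB _ _).1 hh
    exact ⟨h, rfl, by omega, by omega, hch⟩
  · rintro ⟨h, rfl, h1, h2, hch⟩
    exact ⟨h.length - 1, by omega, h, (mem_pvGrowB _ _).2 ⟨by omega, hch⟩, rfl⟩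

theorem nodup_pvAllA (n : Nat) : (pvAllA n).Nodup := by
  rw [pvAllA, List.nodup_flatMap]
  constructor
  · exact fun i _ => (nodup_pvProduct (i + 1)).map (fun a b h => ofList_inj h)
  · refine List.Pairwise.imp_of_mem ?_ (List.nodup_range (n := n))
    intro i j _ _ hne s hs hs'
    simp only [List.mem_map] at hs hs'
    obtain ⟨m, hm, rfl⟩ := hs
    obtain ⟨m', hm', he⟩ := hs'
    obtain rfl := ofList_inj he
    have l1 := ((mem_pvProduct _ _).1 hm).1
    have l2 := ((mem_pvProduct _ _).1 hm').1
    omega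

theorem nodup_pvSelfB (n : Nat) : (pvSelfB n).Nodup := by
  rw [pvSelfB, List.nodup_flatMap]
  constructor
  · intro i _
    refine (nodup_pvGrowB (i + 1)).map ?_
    intro a b hab
    have he := ofList_inj hab
    have hlen : a.length = b.length := by
      have := congrArg List.length he
      simp [pvRevComp] at this
      omega
    exact (List.append_inj he hlen).1
  · refine List.Pairwise.imp_of_mem ?_ (List.nodup_range (n := n / 2))
    intro i j _ _ hne s hs hs'
    simp only [List.mem_map] at hs hs'
    obtain ⟨h, hh, rfl⟩ := hs
    obtain ⟨h', hh', he⟩ := hs'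
    obtain he2 := ofList_inj he
    have l1 := ((mem_pvGrowB _ _).1 hh).1
    have l2 := ((mem_pvGrowB _ _).1 hh').1
    have := congrArg List.length he2
    simp [pvRevComp] at this
    omega

theorem nodup_pvNonB (n : Nat) : (pvNonB n).Nodup := by
  rw [pvNonB, List.nodup_flatMap]
  constructor
  · exact fun i _ => ((nodup_pvGrowB (i + 1)).filter _).map (fun a b h => ofList_inj h)
  · refine List.Pairwise.imp_of_mem ?_ (List.nodup_range (n := n))
    intro i j _ _ hne s hs hs'
    simp only [List.mem_map, List.mem_filter] at hs hs'
    obtain ⟨m, ⟨hm, _⟩, rfl⟩ := hs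
    obtain ⟨m', ⟨hm', _⟩, he⟩ := hs'
    obtain rfl := ofList_inj he
    have l1 := ((mem_pvGrowB _ _).1 hm).1
    have l2 := ((mem_pvGrowB _ _).1 hm').1
    omega

theorem selfRC_of_pal (h' : List Char) (hc : pvCharsOK h') :
    h' ++ pvRevComp h' = pvRevComp (h' ++ pvRevComp h') := by
  have : pvRevComp (h' ++ pvRevComp h') = pvRevComp (pvRevComp h') ++ pvRevComp h' := by
    simp [pvRevComp]
  rw [this, pvRevComp_invol hc]

theorem charsOK_append {a b : List Char} (ha : pvCharsOK a) (hb : pvCharsOK b) :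
    pvCharsOK (a ++ b) := by
  intro c hc
  rcases List.mem_append.1 hc with h | h
  · exact ha c h
  · exact hb c h

theorem self_iff (n : Nat) (s : String) :
    s ∈ (pvAllA n).filter (fun s => is_self_reverse_complement s) ↔ s ∈ pvSelfB n := by
  rw [List.mem_filter, mem_pvAllA, mem_pvSelfB]
  constructor
  · rintro ⟨⟨m, rfl, h1, h2, hch⟩, hcond⟩
    rw [cond_ofList] at hcond
    obtain ⟨h, hm⟩ := pal_of_selfRC m.length m rfl hch (of_decide_eq_true hcond)
    subst hm
    have hlen : (h ++ pvRevComp h).length = 2 * h.length := by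
      simp [pvRevComp]; omega
    exact ⟨h, rfl, by omega, by omega, fun c hc => hch c (by simp [hc])⟩
  · rintro ⟨h, rfl, h1, h2, hch⟩
    have hall : pvCharsOK (h ++ pvRevComp h) := charsOK_append hch (pvRevComp_charsOK hch)
    refine ⟨⟨h ++ pvRevComp h, rfl, by simp [pvRevComp]; omega, ?_, hall⟩, ?_⟩
    · have : (h ++ pvRevComp h).length = 2 * h.length := by simp [pvRevComp]; omega
      omega
    · rw [cond_ofList]
      exact decide_eq_true (selfRC_of_pal h hch)

theorem mem_selfB_iff_cond (n : Nat) (m : List Char) (h1 : 1 ≤ m.length)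
    (h2 : m.length ≤ n) (hch : pvCharsOK m) :
    String.ofList m ∈ pvSelfB n ↔ m = pvRevComp m := by
  rw [mem_pvSelfB]
  constructor
  · rintro ⟨h, he, _, _, hchh⟩
    obtain rfl := ofList_inj he
    exact selfRC_of_pal h hchh
  · intro hself
    obtain ⟨h, rfl⟩ := pal_of_selfRC m.length m rfl hch hself
    have hlen : (h ++ pvRevComp h).length = 2 * h.length := by simp [pvRevComp]; omega
    exact ⟨h, rfl, by omega, by omega, fun c hc => hch c (by simp [hc])⟩

theorem non_iff (n : Nat) (s : String) :
    s ∈ (pvAllA n).filter (fun s => !is_self_reverse_complement s) ↔ s ∈ pvNonB n := by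
  rw [List.mem_filter, mem_pvAllA]
  simp only [pvNonB, List.mem_flatMap, List.mem_range, List.mem_map, List.mem_filter]
  constructor
  · rintro ⟨⟨m, rfl, h1, h2, hch⟩, hcond⟩
    rw [cond_ofList] at hcond
    have hne : ¬ (m = pvRevComp m) := by simpa using hcond
    refine ⟨m.length - 1, by omega, m, ⟨(mem_pvGrowB _ _).2 ⟨by omega, hch⟩, ?_⟩, rfl⟩
    have : ¬ String.ofList m ∈ pvSelfB n := fun hx =>
      hne ((mem_selfB_iff_cond n m h1 h2 hch).1 hx)
    simpa [PySem.Set.contains_iff] using this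
  · rintro ⟨i, hi, m, ⟨hm, hnotin⟩, rfl⟩
    obtain ⟨hlen, hch⟩ := (mem_pvGrowB _ _).1 hm
    have h1 : 1 ≤ m.length := by omega
    have h2 : m.length ≤ n := by omega
    have hnot : ¬ String.ofList m ∈ pvSelfB n := by
      simpa [PySem.Set.contains_iff] using hnotin
    refine ⟨⟨m, rfl, h1, h2, hch⟩, ?_⟩
    rw [cond_ofList]
    simpa using fun hx => hnot ((mem_selfB_iff_cond n m h1 h2 hch).2 hx)

theorem foldA_inner (ms : List (List Char)) (q : PySem.Set String × PySem.Set String) :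
    ms.foldl (fun (q : PySem.Set String × PySem.Set String) motif =>
        let motif_str := String.ofList motif
        if is_self_reverse_complement motif_str then (PySem.Set.add q.1 motif_str, q.2)
        else (q.1, PySem.Set.add q.2 motif_str)) q
    = (q.1.update ((ms.map String.ofList).filter (fun s => is_self_reverse_complement s)),
       q.2.update ((ms.map String.ofList).filter (fun s => !is_self_reverse_complement s))) := by
  induction ms generalizing q with
  | nil => simp [PySem.Set.update]
  | cons m ms ih =>
    simp only [List.foldl_cons, List.map_cons, List.filter_cons]
    by_cases hc : is_self_reverse_complement (String.ofList m)
    · simp [hc, ih, PySem.Set.update_cons]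
    · simp [hc, ih, PySem.Set.update_cons]

theorem foldA (n : Nat) :
    (PySem.List.pyRange 1 ((n : Int) + 1) 1).foldl
      (fun (p : PySem.Set String × PySem.Set String) length =>
        (pvProduct length.toNat).foldl
          (fun (q : PySem.Set String × PySem.Set String) motif =>
            let motif_str := String.ofList motif
            if is_self_reverse_complement motif_str then (PySem.Set.add q.1 motif_str, q.2)
            else (q.1, PySem.Set.add q.2 motif_str)) p)
      (PySem.Set.empty, PySem.Set.empty)
    = (PySem.Set.ofList ((pvAllA n).filter (fun s => is_self_reverse_complement s)),
       PySem.Set.ofList ((pvAllA n).filter (fun s => !is_self_reverse_complement s))) := by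
  induction n with
  | zero =>
    rw [PySem.List.pyRange_one_eq_nil (by norm_num)]
    simp [pvAllA, PySem.Set.empty, PySem.Set.ofList]
  | succ k ih =>
    have hcast : ((k + 1 : Nat) : Int) + 1 = ((k : Int) + 1) + 1 := by push_cast; ring
    rw [hcast, PySem.List.pyRange_one_succ_right (by omega : (1:Int) ≤ (k : Int) + 1), List.foldl_append, ih]
    simp only [List.foldl_cons, List.foldl_nil]
    have htn : ((k : Int) + 1).toNat = k + 1 := by omega
    rw [htn, foldA_inner]
    have hall : pvAllA (k + 1) = pvAllA k ++ (pvProduct (k + 1)).map String.ofList := by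
      rw [pvAllA, pvAllA, List.range_succ, List.flatMap_append]
      simp
    rw [hall, List.filter_append, List.filter_append, PySem.Set.ofList_append,
      PySem.Set.ofList_append]

theorem foldB (l : List Int) (g : List (List Char) → List String) (j : Nat) (out : List String) :
    l.foldl (fun (st : List (List Char) × List String) _ =>
        (pvExtend st.1, st.2 ++ g (pvExtend st.1))) (pvGrowB j, out)
    = (pvGrowB (j + l.length),
       out ++ (List.range l.length).flatMap (fun i => g (pvGrowB (j + i + 1)))) := by
  induction l generalizing j out with
  | nil => simp
  | cons x l ih =>
    simp only [List.foldl_cons]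
    have h1 : pvExtend (pvGrowB j) = pvGrowB (j + 1) := rfl
    rw [h1, ih (j + 1) (out ++ g (pvGrowB (j + 1)))]
    refine Prod.ext ?_ ?_
    · simp only []
      show pvGrowB (j + 1 + l.length) = pvGrowB (j + (l.length + 1))
      congr 1
      omega
    · show (out ++ g (pvGrowB (j + 1)))
          ++ (List.range l.length).flatMap (fun i => g (pvGrowB (j + 1 + i + 1)))
        = out ++ (List.range (l.length + 1)).flatMap (fun i => g (pvGrowB (j + i + 1)))
      rw [List.range_succ_eq_map, List.flatMap_cons, List.flatMap_map, List.append_assoc]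
      have e0 : j + 0 + 1 = j + 1 := by omega
      rw [e0]
      congr 1
      congr 1
      refine List.flatMap_congr ?_
      intro i
      have : j + 1 + i + 1 = j + i.succ + 1 := by omega
      rw [this]
      intro _
      rfl


theorem foldB_self (l : List Int) :
    l.foldl (fun (st : List (List Char) × List String) _ =>
        let halves := pvExtend st.1
        (halves, st.2 ++ halves.map (fun h => String.ofList (h ++ pvRevComp h))))
      ([[]], [])
    = (pvGrowB l.length, (List.range l.length).flatMap
        (fun i => (pvGrowB (i + 1)).map (fun h => String.ofList (h ++ pvRevComp h)))) := by
  have h := foldB l (fun ms => ms.map (fun h => String.ofList (h ++ pvRevComp h))) 0 []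
  simpa using h

theorem foldB_non (s : PySem.Set String) (l : List Int) :
    l.foldl (fun (st : List (List Char) × List String) _ =>
        let motifs := pvExtend st.1
        (motifs, st.2 ++ (motifs.filter
          (fun m => !(PySem.Set.contains s (String.ofList m)))).map String.ofList))
      ([[]], [])
    = (pvGrowB l.length, (List.range l.length).flatMap
        (fun i => ((pvGrowB (i + 1)).filter
          (fun m => !(PySem.Set.contains s (String.ofList m)))).map String.ofList)) := by
  have h := foldB l (fun ms => (ms.filter
      (fun m => !(PySem.Set.contains s (String.ofList m)))).map String.ofList) 0 []
  simpa using h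

theorem main_eq (ml : Int) :
    generate_motifs_by_complementarity ml = generate_motifs_by_complementarity_alt ml := by
  set n := ml.toNat with hn
  have hr1 : PySem.List.pyRange 1 (ml + 1) 1 = PySem.List.pyRange 1 ((n : Int) + 1) 1 := by
    rw [PySem.List.pyRange_one, PySem.List.pyRange_one]
    have h : (ml + 1 - 1).toNat = ((n : Int) + 1 - 1).toNat := by omega
    rw [h]
  have hr2 : PySem.List.pyRange 1 (PySem.Int.floordiv ml 2 + 1) 1
      = PySem.List.pyRange 1 (((n / 2 : Nat) : Int) + 1) 1 := by
    rw [PySem.Int.floordiv_eq_ediv_of_pos (by norm_num)]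
    rw [PySem.List.pyRange_one, PySem.List.pyRange_one]
    have h : (ml / 2 + 1 - 1).toNat = (((n / 2 : Nat) : Int) + 1 - 1).toNat := by omega
    rw [h]
  have hlen1 : (PySem.List.pyRange 1 ((n : Int) + 1) 1).length = n := by
    rw [PySem.List.length_pyRange_one]; omega
  have hlen2 : (PySem.List.pyRange 1 (((n / 2 : Nat) : Int) + 1) 1).length = n / 2 := by
    rw [PySem.List.length_pyRange_one]; omega
  rw [generate_motifs_by_complementarity, generate_motifs_by_complementarity_alt]
  rw [hr1, hr2, foldA n, foldB_self, hlen2]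
  have hself : (List.range (n / 2)).flatMap
      (fun i => (pvGrowB (i + 1)).map (fun h => String.ofList (h ++ pvRevComp h)))
      = pvSelfB n := rfl
  rw [hself]
  have hsetself : PySem.Set.ofList (pvSelfB n) = pvSelfB n :=
    PySem.Set.ofList_eq_self_of_nodup _ (nodup_pvSelfB n)
  rw [hsetself, foldB_non, hlen1]
  have hnon : (List.range n).flatMap (fun i =>
      ((pvGrowB (i + 1)).filter
        (fun m => !(PySem.Set.contains (pvSelfB n) (String.ofList m)))).map String.ofList)
      = pvNonB n := rfl
  rw [hnon]
  have hof1 : PySem.Set.ofList ((pvAllA n).filter (fun s => is_self_reverse_complement s))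
      = (pvAllA n).filter (fun s => is_self_reverse_complement s) :=
    PySem.Set.ofList_eq_self_of_nodup _ ((nodup_pvAllA n).filter _)
  have hof2 : PySem.Set.ofList ((pvAllA n).filter (fun s => !is_self_reverse_complement s))
      = (pvAllA n).filter (fun s => !is_self_reverse_complement s) :=
    PySem.Set.ofList_eq_self_of_nodup _ ((nodup_pvAllA n).filter _)
  rw [hof1, hof2]
  refine Prod.ext ?_ ?_
  · exact (PySem.List.sorted_id_eq_sorted_id_iff_perm _ _).2
      ((List.perm_ext_iff_of_nodup ((nodup_pvAllA n).filter _) (nodup_pvSelfB n)).2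
        (self_iff n))
  · exact (PySem.List.sorted_id_eq_sorted_id_iff_perm _ _).2
      ((List.perm_ext_iff_of_nodup ((nodup_pvAllA n).filter _) (nodup_pvNonB n)).2
        (non_iff n))

-- ===== VERDICT (by name: the statement is the Claim_ definition above) =====
theorem generate_motifs_by_complementarity_spec : Claim_equal_generate_motifs_by_complementarity := by
  intro ml _
  unfold Spec_generate_motifs_by_complementarity
  exact main_eq ml
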